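-- pv_equiv track=rewrite | github.com/gBlaku/Python-Data-Science | covid.py | fill_missing_symptoms
-- ===== SOURCE A (Python) =====
-- def fill_missing_symptoms(covidData):
--     dictOfSymptoms = {
--        # 'fakeProvince'  : { 'fakeSymptom' : 1 }
--     }
--     for covidCase in covidData:
--         currentSymptom = covidCase.get('symptoms')
--         symptomInCurrentSymptom = currentSymptom.split(';')
--         for symp in symptomInCurrentSymptom:
--             symp = symp.strip()
--             if 'fever' in symp:
--                 symp = 'fever'
--             currentProvince = covidCase.get('province')
--             if currentProvince in dictOfSymptoms.keys():
--                 if symp in dictOfSymptoms[currentProvince] and symp != 'NaN':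
--                     dictOfSymptoms[currentProvince][symp] += 1
--                 elif symp != 'NaN':
--                     dictOfSymptoms[currentProvince][symp] = 1
--             elif symp != 'NaN':
--                 dictOfSymptoms[currentProvince] = {symp:1}
--
--     mostProvince = {}
--     for province, dictSymptomsInProvince in dictOfSymptoms.items():
--         highestNum = -1
--         highestSymptom = ''
--         for symptom, num in dictSymptomsInProvince.items():
--             if highestNum < num:
--                 highestSymptom = symptom
--                 highestNum = num
--             elif highestNum == num:
--                 if highestSymptom> symptom:
--                     highestSymptom = symptom
--                     highestNum = num
--         mostProvince[province] = highestSymptom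
--
--
--     for covidCase in covidData:
--         if covidCase['symptoms'] == 'NaN':
--             covidCase['symptoms'] = mostProvince[covidCase['province']]
--     return covidData
-- ===== SOURCE B (Python) =====
-- def fill_missing_symptoms(covidData):
--     # No counting dictionaries at all: for each case with missing symptoms we
--     # recompute the province's occurrence list directly from the (unmutated)
--     # data, deduplicate with a set, count with list.count and select with
--     # min(key=(-count, symptom)).  Replacements are computed for all missing
--     # cases first and only then written back in place.
--     def occurrences(prov):
--         occs = []
--         for case in covidData:
--             if case.get('province') == prov:
--                 for raw in case['symptoms'].split(';'):
--                     s = raw.strip()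
--                     if 'fever' in s:
--                         s = 'fever'
--                     if s != 'NaN':
--                         occs.append(s)
--         return occs
--
--     pending = [case for case in covidData if case['symptoms'] == 'NaN']
--     replacements = []
--     for case in pending:
--         occs = occurrences(case.get('province'))
--         replacements.append(min(set(occs), key=lambda s: (-occs.count(s), s)))
--     for case, value in zip(pending, replacements):
--         case['symptoms'] = value
--     return covidData
-- ===== Notes on version B (the rewrite author's own statement) =====
-- stated objective: alternative
-- what changed: B drops A's precomputed dict-of-dicts counters and argmax pass entirely: for each case with missing symptoms it recomputes that province's occurrence list directly from the data, deduplicates with a set, counts with list.count and selects with min(key=(-count, symptom)), computing all replacements before the in-place writeback; it trades A's linear precomputation for per-query recomputation (quadratic when many entries are missing).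
import Mathlib
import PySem

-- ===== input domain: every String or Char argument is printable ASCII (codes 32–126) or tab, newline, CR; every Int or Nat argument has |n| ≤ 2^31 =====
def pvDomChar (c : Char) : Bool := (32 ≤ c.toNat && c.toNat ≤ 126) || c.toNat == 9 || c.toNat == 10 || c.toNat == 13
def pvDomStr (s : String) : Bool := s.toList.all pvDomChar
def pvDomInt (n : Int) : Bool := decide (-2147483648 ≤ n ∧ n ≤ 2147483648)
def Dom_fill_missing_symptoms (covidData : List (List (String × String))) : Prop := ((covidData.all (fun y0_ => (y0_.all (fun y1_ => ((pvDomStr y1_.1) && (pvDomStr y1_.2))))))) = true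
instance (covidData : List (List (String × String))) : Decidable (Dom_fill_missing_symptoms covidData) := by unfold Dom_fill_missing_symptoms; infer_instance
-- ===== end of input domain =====

-- B drops A's precomputed dict-of-dicts counters and argmax pass: each missing entry's replacement is
-- recomputed per query (set + list.count + min(key=(-count, symptom))) from the unmutated data; same
-- return value (both Pythons also mutate the case dicts in place, in the same way, in their final pass).


-- shared helper: both Pythons contain the identical snippet "s = raw.strip(); if 'fever' in s: s = 'fever'"
def pvSymp (raw : String) : String :=
  let s := PySem.Str.strip raw
  if PySem.Str.isIn "fever" s then "fever" else s

-- shared helper: both Pythons read case's 'symptoms' and split on ';' ([] stands for the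
-- AttributeError/KeyError Python raises when the key is missing; excluded by Pre_)
def pvSyms (covidCase : List (String × String)) : List String :=
  match PySem.Dict.get? (PySem.Dict.mk covidCase) "symptoms" with
  | some cs => (PySem.Str.split? cs ";").getD []
  | none => []

-- ===== PORT A =====
def pvCountA (covidData : List (List (String × String))) :
    PySem.Dict (Option String) (PySem.Dict String Int) :=
  covidData.foldl (fun d covidCase =>
    (pvSyms covidCase).foldl (fun d raw =>
      let symp := pvSymp raw
      let currentProvince := PySem.Dict.get? (PySem.Dict.mk covidCase) "province"
      if d.contains currentProvince then
        let inner := d.getD currentProvince PySem.Dict.empty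
        if inner.contains symp && symp != "NaN" then
          d.insert currentProvince (inner.insert symp (inner.getD symp 0 + 1))
        else if symp != "NaN" then
          d.insert currentProvince (inner.insert symp 1)
        else d
      else if symp != "NaN" then
        d.insert currentProvince (PySem.Dict.ofList [(symp, 1)])
      else d) d) PySem.Dict.empty

def pvMostA (covidData : List (List (String × String))) : PySem.Dict (Option String) String :=
  (pvCountA covidData).items.foldl (fun m pr =>
    let best := pr.2.items.foldl (fun (hs : Int × String) sn =>
      if hs.1 < sn.2 then (sn.2, sn.1)
      else if hs.1 = sn.2 then (if sn.1 < hs.2 then (sn.2, sn.1) else hs)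
      else hs) (-1, "")
    m.insert pr.1 best.2) PySem.Dict.empty

def fill_missing_symptoms (covidData : List (List (String × String))) : List (List (String × String)) :=
  let most := pvMostA covidData
  covidData.map (fun covidCase =>
    if PySem.Dict.get? (PySem.Dict.mk covidCase) "symptoms" = some "NaN" then
      match PySem.Dict.get? (PySem.Dict.mk covidCase) "province" with
      | some p =>
        match most.get? (some p) with
        | some v => (PySem.Dict.insert (PySem.Dict.mk covidCase) "symptoms" v).items
        | none => covidCase   -- Python: KeyError (excluded by Pre_)
      | none => covidCase     -- Python: KeyError (excluded by Pre_)
    else covidCase)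

-- ===== PORT B =====
-- B's occurrences(prov): one scan of the data collecting that province's cleaned, non-'NaN' symptoms
def pvOccs (covidData : List (List (String × String))) (prov : Option String) : List String :=
  covidData.foldl (fun occs c =>
    if PySem.Dict.get? (PySem.Dict.mk c) "province" == prov then
      (pvSyms c).foldl (fun occs raw =>
        let s := pvSymp raw
        if s != "NaN" then occs ++ [s] else occs) occs
    else occs) []

-- Python's min(set(occs), key=lambda s: (-occs.count(s), s)); tuple '<' is lexicographic, ported
-- explicitly (exact: the key is injective on the set's distinct elements, so ties cannot occur);
-- none stands for the ValueError on an empty set (excluded by Pre_)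
def pvMin? (occs : List String) : Option String :=
  (PySem.Set.ofList occs).foldl (fun best s =>
    match best with
    | none => some s
    | some b =>
      if (-(occs.count s : Int) < -(occs.count b : Int) ∨
          (-(occs.count s : Int) = -(occs.count b : Int) ∧ s < b)) then some s else some b) none

def fill_missing_symptoms_alt (covidData : List (List (String × String))) : List (List (String × String)) :=
  covidData.map (fun covidCase =>
    if PySem.Dict.get? (PySem.Dict.mk covidCase) "symptoms" = some "NaN" then
      match pvMin? (pvOccs covidData (PySem.Dict.get? (PySem.Dict.mk covidCase) "province")) with
      | some v => (PySem.Dict.insert (PySem.Dict.mk covidCase) "symptoms" v).items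
      | none => covidCase   -- Python: ValueError on min of an empty set (excluded by Pre_)
    else covidCase)

-- ===== PRECONDITION & SPEC =====
-- Pre_ excludes exactly the inputs on which Python A raises: a case without a 'symptoms' key
-- (AttributeError on None.split), and a 'NaN'-symptoms case whose 'province' key is missing or was
-- never seen with a countable (non-'NaN' after strip/fever-collapse) symptom (KeyError in the last pass).
def Pre_fill_missing_symptoms (covidData : List (List (String × String))) : Prop :=
  (∀ c ∈ covidData, ((PySem.Dict.mk c).get? "symptoms").isSome) ∧
  (∀ c ∈ covidData, (PySem.Dict.mk c).get? "symptoms" = some "NaN" →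
     ∃ c' ∈ covidData,
       (PySem.Dict.mk c').get? "province" ≠ none ∧
       (PySem.Dict.mk c').get? "province" = (PySem.Dict.mk c).get? "province" ∧
       ∃ raw ∈ (PySem.Str.split? (((PySem.Dict.mk c').get? "symptoms").getD "") ";").getD [],
         pvSymp raw ≠ "NaN")
instance (covidData : List (List (String × String))) : Decidable (Pre_fill_missing_symptoms covidData) := by
  unfold Pre_fill_missing_symptoms; infer_instance

def pvWitness_fill_missing_symptoms : (List (List (String × String))) :=
  [[("symptoms", "cough"), ("province", "ON")], [("symptoms", "NaN"), ("province", "ON")]]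

def Spec_fill_missing_symptoms (covidData : List (List (String × String))) (out : List (List (String × String))) : Prop := out = fill_missing_symptoms_alt covidData
instance (covidData : List (List (String × String))) (out : List (List (String × String))) : Decidable (Spec_fill_missing_symptoms covidData out) := by unfold Spec_fill_missing_symptoms; infer_instance

-- ===== CLAIM (what is proved, stated in full; the proofs are below) =====
def Claim_equal_fill_missing_symptoms : Prop := ∀ (covidData : List (List (String × String))), Dom_fill_missing_symptoms covidData → Pre_fill_missing_symptoms covidData → Spec_fill_missing_symptoms covidData (fill_missing_symptoms covidData)

-- ===== LEMMAS AND PROOFS =====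

-- proof-only helpers
def pvCStep (inner : PySem.Dict String Int) (s : String) : PySem.Dict String Int :=
  inner.insert s (inner.getD s 0 + 1)

def pvAStep (hs : Int × String) (sn : String × Int) : Int × String :=
  if hs.1 < sn.2 then (sn.2, sn.1)
  else if hs.1 = sn.2 then (if sn.1 < hs.2 then (sn.2, sn.1) else hs)
  else hs

def pvMStep (acc : Option (Int × String)) (key : Int × String) : Option (Int × String) :=
  match acc with
  | none => some key
  | some cur => if key.1 < cur.1 ∨ (key.1 = cur.1 ∧ key.2 < cur.2) then some key else some cur

-- step lemma: one comparison step of A's argmax loop matches one step of B's lexicographic-min scan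
theorem pvStep_match (hN : Int) (hS : String) (c : Int) (s : String) :
    pvMStep (some (-hN, hS)) (-c, s)
      = some (-(pvAStep (hN, hS) (s, c)).1, (pvAStep (hN, hS) (s, c)).2) := by
  unfold pvMStep pvAStep
  rcases lt_trichotomy hN c with h | h | h
  · simp [h, h.ne', neg_lt_neg_iff]
  · subst h
    by_cases hs : s < hS <;> simp [hs]
  · simp [(neg_lt_neg_iff).not.mpr (not_lt_of_gt h), not_lt_of_gt h, (neg_inj).not.mpr h.ne, h.ne']

theorem pvCmp_fold (u : List String) (c : String → Int) (hN : Int) (hS : String) :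
    (u.map (fun s => ((-(c s), s) : Int × String))).foldl pvMStep (some (-hN, hS))
      = some (-((u.map (fun s => (s, c s))).foldl pvAStep (hN, hS)).1,
              ((u.map (fun s => (s, c s))).foldl pvAStep (hN, hS)).2) := by
  induction u generalizing hN hS with
  | nil => simp
  | cons s u ih =>
    simp only [List.map_cons, List.foldl_cons]
    rw [pvStep_match hN hS (c s) s]
    exact ih _ _

-- grouping fold: A's counting loop, normalised to one fold over (province, symptom) pairs
theorem pvGetD_group {κ : Type} [BEq κ] [LawfulBEq κ]
    (l : List (κ × String)) (d : PySem.Dict κ (PySem.Dict String Int)) (q : κ) :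
    (l.foldl (fun d x => d.insert x.1 (pvCStep (d.getD x.1 PySem.Dict.empty) x.2)) d).getD q PySem.Dict.empty
      = ((l.filter (fun x => x.1 == q)).map Prod.snd).foldl pvCStep (d.getD q PySem.Dict.empty) := by
  induction l generalizing d with
  | nil => rfl
  | cons x l ih =>
    simp only [List.foldl_cons, List.filter_cons]
    by_cases hx : x.1 = q
    · subst hx
      simp only [BEq.rfl, if_pos, List.map_cons, List.foldl_cons]
      rw [ih]
      rw [PySem.Dict.getD_insert_self]
    · have hbe : (x.1 == q) = false := by simp [hx]
      simp only [hbe, if_neg, Bool.false_eq_true, not_false_iff]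
      rw [ih]
      rw [PySem.Dict.getD_insert_of_ne _ _ _ (Ne.symm hx)]

theorem pvContains_group {κ : Type} [BEq κ] [LawfulBEq κ]
    (l : List (κ × String)) (d : PySem.Dict κ (PySem.Dict String Int)) (q : κ) :
    (l.foldl (fun d x => d.insert x.1 (pvCStep (d.getD x.1 PySem.Dict.empty) x.2)) d).contains q
      = (d.contains q || l.any (fun x => x.1 == q)) := by
  induction l generalizing d with
  | nil => simp
  | cons x l ih =>
    simp only [List.foldl_cons, List.any_cons]
    rw [ih, PySem.Dict.contains_insert]
    by_cases hx : x.1 = q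
    · subst hx; simp
    · have : (q == x.1) = false := by simp [Ne.symm hx]
      have h2 : (x.1 == q) = false := by simp [hx]
      simp [this, h2]

-- a fold of key-disjoint inserts leaves a lookup alone
theorem pvGet?_foldl_insert_not_mem {κ ν ω : Type} [BEq κ] [LawfulBEq κ]
    (l : List (κ × ν)) (f : κ × ν → ω) (m0 : PySem.Dict κ ω) (q : κ)
    (h : ∀ x ∈ l, ¬ (x.1 = q)) :
    (l.foldl (fun m x => m.insert x.1 (f x)) m0).get? q = m0.get? q := by
  induction l generalizing m0 with
  | nil => rfl
  | cons x l ih =>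
    simp only [List.foldl_cons]
    rw [ih _ (fun y hy => h y (List.mem_cons_of_mem _ hy)),
        PySem.Dict.get?_insert_of_ne _ _ (fun hq => h x (List.mem_cons_self) hq.symm)]

theorem pvGet?_foldl_insert_map {κ ν ω : Type} [BEq κ] [LawfulBEq κ]
    (l : List (κ × ν)) (f : κ × ν → ω) (m0 : PySem.Dict κ ω) (q : κ)
    (hnd : (l.map Prod.fst).Nodup) :
    (l.foldl (fun m x => m.insert x.1 (f x)) m0).get? q
      = match l.find? (fun x => x.1 == q) with
        | some x => some (f x)
        | none => m0.get? q := by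
  induction l generalizing m0 with
  | nil => rfl
  | cons x l ih =>
    simp only [List.map_cons, List.nodup_cons] at hnd
    simp only [List.foldl_cons, List.find?_cons]
    by_cases hx : x.1 = q
    · have hbe : (x.1 == q) = true := by simp [hx]
      simp only [hbe]
      rw [pvGet?_foldl_insert_not_mem]
      · subst hx; exact PySem.Dict.get?_insert_self _ _ _
      · intro y hy hyq
        apply hnd.1
        have : y.1 ∈ l.map Prod.fst := List.mem_map_of_mem hy
        rwa [hyq, ← hx] at this
    · have hbe : (x.1 == q) = false := by simp [hx]
      simp only [hbe]
      rw [ih _ hnd.2]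
      cases l.find? (fun x => x.1 == q) with
      | some y => rfl
      | none => exact PySem.Dict.get?_insert_of_ne _ _ (fun hq => hx hq.symm)

-- find? on a dict's items is get?
theorem pvFind?_items {κ ν : Type} [BEq κ] [LawfulBEq κ] (d : PySem.Dict κ ν) (q : κ) :
    d.items.find? (fun x => x.1 == q) = (d.get? q).map (fun v => (q, v)) := by
  rcases d with ⟨l⟩
  induction l with
  | nil => rfl
  | cons x l ih =>
    obtain ⟨k, v⟩ := x
    show (((k, v) :: l).find? (fun x => x.1 == q)) = _
    rw [List.find?_cons]
    by_cases hk : k = q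
    · subst hk; simp [PySem.Dict.get?_mk_cons]
    · have hbe : (k == q) = false := by simp [hk]
      simp only [PySem.Dict.get?_mk_cons, hbe, Bool.false_eq_true, if_false]
      simpa [hbe] using ih

-- the flattened, processed (province, symptom) occurrence list A's counting pass consumes
def pvPairsOf (c : List (String × String)) : List (Option String × String) :=
  ((pvSyms c).map (fun raw => (PySem.Dict.get? (PySem.Dict.mk c) "province", pvSymp raw))).filter
    (fun x => x.2 != "NaN")

def pvPairs (covidData : List (List (String × String))) : List (Option String × String) :=
  covidData.flatMap pvPairsOf

theorem pvFoldl_flatMap {α β σ : Type} (l : List α) (g : α → List β) (f : σ → β → σ) (init : σ) :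
    (l.flatMap g).foldl f init = l.foldl (fun acc a => (g a).foldl f acc) init := by
  induction l generalizing init with
  | nil => rfl
  | cons a l ih => simp only [List.flatMap_cons, List.foldl_append, List.foldl_cons, ih]

-- A's branchy counting step is one grouped counter step
theorem pvStepA_eq (d : PySem.Dict (Option String) (PySem.Dict String Int)) (prov : Option String) (s : String) :
    (if d.contains prov then
        let inner := d.getD prov PySem.Dict.empty
        if inner.contains s && s != "NaN" then
          d.insert prov (inner.insert s (inner.getD s 0 + 1))
        else if s != "NaN" then
          d.insert prov (inner.insert s 1)
        else d
      else if s != "NaN" then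
        d.insert prov (PySem.Dict.ofList [(s, 1)])
      else d)
    = if s != "NaN" then d.insert prov (pvCStep (d.getD prov PySem.Dict.empty) s) else d := by
  by_cases hn : s = "NaN"
  · subst hn; simp
  · have hb : (s != "NaN") = true := by simp [hn]
    simp only [hb, Bool.and_true, if_true]
    by_cases hc : d.contains prov
    · simp only [hc, if_true]
      by_cases hcs : (d.getD prov PySem.Dict.empty).contains s
      · simp [hcs, pvCStep]
      · have h0 : (d.getD prov PySem.Dict.empty).getD s 0 = 0 :=
          PySem.Dict.getD_of_not_contains _ _ (by simpa using hcs)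
        simp [hcs, pvCStep, h0]
    · have hcf : d.contains prov = false := eq_false_of_ne_true hc
      have hd : d.getD prov PySem.Dict.empty = PySem.Dict.empty :=
        PySem.Dict.getD_of_not_contains _ _ hcf
      simp only [hcf, Bool.false_eq_true, if_false, pvCStep, hd]
      rfl

set_option maxHeartbeats 2000000 in
theorem pvCountA_eq (covidData : List (List (String × String))) :
    pvCountA covidData
      = (pvPairs covidData).foldl
          (fun d x => d.insert x.1 (pvCStep (d.getD x.1 PySem.Dict.empty) x.2)) PySem.Dict.empty := by
  unfold pvCountA pvPairs
  rw [pvFoldl_flatMap]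
  apply PySem.List.foldl_congr_mem
  intro d c _
  show (pvSyms c).foldl _ d = _
  have hstep :
      (fun (d : PySem.Dict (Option String) (PySem.Dict String Int)) (raw : String) =>
        if pvSymp raw != "NaN" then
          d.insert (PySem.Dict.get? (PySem.Dict.mk c) "province")
            (pvCStep (d.getD (PySem.Dict.get? (PySem.Dict.mk c) "province") PySem.Dict.empty) (pvSymp raw))
        else d)
      = fun d raw => (fun (d : PySem.Dict (Option String) (PySem.Dict String Int))
          (x : Option String × String) =>
            if x.2 != "NaN" then d.insert x.1 (pvCStep (d.getD x.1 PySem.Dict.empty) x.2) else d) d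
          ((fun raw => (PySem.Dict.get? (PySem.Dict.mk c) "province", pvSymp raw)) raw) := rfl
  calc (pvSyms c).foldl _ d
      = (pvSyms c).foldl (fun d raw =>
          if pvSymp raw != "NaN" then
            d.insert (PySem.Dict.get? (PySem.Dict.mk c) "province")
              (pvCStep (d.getD (PySem.Dict.get? (PySem.Dict.mk c) "province") PySem.Dict.empty) (pvSymp raw))
          else d) d := by
        apply PySem.List.foldl_congr_mem
        intro d' raw _
        exact pvStepA_eq d' (PySem.Dict.get? (PySem.Dict.mk c) "province") (pvSymp raw)
    _ = (pvPairsOf c).foldl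
          (fun d x => d.insert x.1 (pvCStep (d.getD x.1 PySem.Dict.empty) x.2)) d := by
        rw [hstep, ← List.foldl_map
            (f := fun raw => (PySem.Dict.get? (PySem.Dict.mk c) "province", pvSymp raw))
            (g := fun (d : PySem.Dict (Option String) (PySem.Dict String Int))
                (x : Option String × String) =>
              if x.2 != "NaN" then d.insert x.1 (pvCStep (d.getD x.1 PySem.Dict.empty) x.2) else d),
          pvPairsOf]
        exact PySem.List.foldl_if_eq_foldl_filter _ _ _ _

theorem pvGet?_countA (covidData : List (List (String × String))) (q : Option String) :
    (pvCountA covidData).get? q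
      = if (pvPairs covidData).any (fun x => x.1 == q) then
          some (PySem.Dict.counter (((pvPairs covidData).filter (fun x => x.1 == q)).map Prod.snd))
        else none := by
  rw [pvCountA_eq]
  have hc := pvContains_group (pvPairs covidData) PySem.Dict.empty q
  have hg := pvGetD_group (pvPairs covidData) PySem.Dict.empty q
  by_cases h : (pvPairs covidData).any (fun x => x.1 == q) = true
  · simp only [h, if_true]
    have hcont : ((pvPairs covidData).foldl
        (fun d x => d.insert x.1 (pvCStep (d.getD x.1 PySem.Dict.empty) x.2)) PySem.Dict.empty).contains q = true := by
      rw [hc, h]; simp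
    have hsome := (PySem.Dict.contains_eq_isSome_get? _ q).symm.trans hcont
    obtain ⟨v, hv⟩ := Option.isSome_iff_exists.mp hsome
    rw [hv]
    have hgd := PySem.Dict.getD_eq_get?_getD ((pvPairs covidData).foldl
        (fun d x => d.insert x.1 (pvCStep (d.getD x.1 PySem.Dict.empty) x.2)) PySem.Dict.empty) q PySem.Dict.empty
    rw [hv] at hgd
    simp only [Option.getD_some] at hgd
    rw [hg] at hgd
    rw [← hgd]
    congr 1
  · have hf : (pvPairs covidData).any (fun x => x.1 == q) = false := eq_false_of_ne_true h
    simp only [hf, Bool.false_eq_true, if_false]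
    rw [PySem.Dict.get?_eq_none_iff_contains, hc, hf]
    simp

theorem pvMostA_get (covidData : List (List (String × String))) (q : Option String) :
    (pvMostA covidData).get? q
      = ((pvCountA covidData).get? q).map (fun inner => ((inner.items.foldl pvAStep (-1, "")).2)) := by
  have hnd : ((pvCountA covidData).items.map Prod.fst).Nodup := by
    rw [pvCountA_eq]
    exact PySem.Dict.nodup_keys_foldl_insert_key _ Prod.fst _ _ PySem.Dict.nodup_keys_empty
  refine (pvGet?_foldl_insert_map ((pvCountA covidData).items)
      (fun x => ((x.2.items.foldl pvAStep (-1, "")).2)) PySem.Dict.empty q hnd).trans ?_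
  rw [pvFind?_items]
  cases (pvCountA covidData).get? q <;> simp [PySem.Dict.get?_empty]

-- B's occurrence scan, per province, is the filtered projection of the flattened pair list
set_option maxHeartbeats 2000000 in
theorem pvOccs_eq (covidData : List (List (String × String))) (q : Option String) :
    pvOccs covidData q = ((pvPairs covidData).filter (fun x => x.1 == q)).map Prod.snd := by
  unfold pvOccs pvPairs
  rw [List.filter_flatMap, List.map_flatMap]
  have : ∀ occs (c : List (String × String)), c ∈ covidData →
      (if PySem.Dict.get? (PySem.Dict.mk c) "province" == q then
        (pvSyms c).foldl (fun occs raw =>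
          let s := pvSymp raw
          if s != "NaN" then occs ++ [s] else occs) occs
      else occs)
      = occs ++ (((pvPairsOf c).filter (fun x => x.1 == q)).map Prod.snd) := by
    intro occs c _
    by_cases hq : PySem.Dict.get? (PySem.Dict.mk c) "province" = q
    · have hbe : (PySem.Dict.get? (PySem.Dict.mk c) "province" == q) = true := by simp [hq]
      rw [if_pos hbe]
      rw [PySem.List.foldl_append_if (p := fun raw => pvSymp raw != "NaN") (f := pvSymp)]
      congr 1
      unfold pvPairsOf
      rw [List.filter_filter, List.filter_map, List.map_map]
      congr 1
      apply List.filter_congr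
      intro raw _
      simp [hq]
    · have hbe : (PySem.Dict.get? (PySem.Dict.mk c) "province" == q) = false := by simp [hq]
      rw [if_neg (by simp [hbe])]
      have : ((pvPairsOf c).filter (fun x => x.1 == q)) = [] := by
        rw [List.filter_eq_nil_iff]
        intro x hx
        unfold pvPairsOf at hx
        obtain ⟨raw, _, hraw⟩ := List.mem_map.mp (List.mem_of_mem_filter hx)
        simp [← hraw, hq]
      rw [this]
      simp
  calc covidData.foldl _ []
      = covidData.foldl (fun occs c =>
          occs ++ (((pvPairsOf c).filter (fun x => x.1 == q)).map Prod.snd)) [] := by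
        apply PySem.List.foldl_congr_mem
        intro occs c hc
        exact this occs c hc
    _ = _ := by
        rw [PySem.List.foldl_append_eq_flatMap]
        simp

-- B's explicit min fold over the set, related to the pvMStep fold over mapped keys
def pvBStep (occs : List String) (best : Option String) (s : String) : Option String :=
  match best with
  | none => some s
  | some b =>
    if (-(occs.count s : Int) < -(occs.count b : Int) ∨
        (-(occs.count s : Int) = -(occs.count b : Int) ∧ s < b)) then some s else some b

theorem pvMin?_fold (occs : List String) (u : List String) (best : Option String) :
    (u.map (fun s => ((-(occs.count s : Int), s) : Int × String))).foldl pvMStep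
        (best.map (fun b => ((-(occs.count b : Int), b) : Int × String)))
      = (u.foldl (pvBStep occs) best).map (fun b => ((-(occs.count b : Int), b) : Int × String)) := by
  induction u generalizing best with
  | nil => rfl
  | cons s u ih =>
    simp only [List.map_cons, List.foldl_cons]
    cases best with
    | none => exact ih (some s)
    | some b =>
      simp only [Option.map_some, pvMStep, pvBStep]
      by_cases h : (-(occs.count s : Int) < -(occs.count b : Int) ∨
          (-(occs.count s : Int) = -(occs.count b : Int) ∧ s < b))
      · rw [if_pos h, if_pos h]
        have := ih (some s)
        simpa using this
      · rw [if_neg h, if_neg h]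
        have := ih (some b)
        simpa using this

theorem pvMin?_eq (occs : List String) :
    (pvMin? occs).map (fun b => ((-(occs.count b : Int), b) : Int × String))
      = ((PySem.Set.ofList occs).map
          (fun s => ((-(occs.count s : Int), s) : Int × String))).foldl pvMStep none := by
  unfold pvMin?
  have hstep : (fun (best : Option String) (s : String) =>
      match best with
      | none => some s
      | some b =>
        if (-(occs.count s : Int) < -(occs.count b : Int) ∨
            (-(occs.count s : Int) = -(occs.count b : Int) ∧ s < b)) then some s else some b)
      = pvBStep occs := rfl
  rw [hstep]
  exact (pvMin?_fold occs (PySem.Set.ofList occs) none).symm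

-- the key correspondence: A's per-province argmax equals B's per-query min-by-key
theorem pvKey (covidData : List (List (String × String))) (q : Option String) :
    (pvMostA covidData).get? q = pvMin? (pvOccs covidData q) := by
  rw [pvMostA_get, pvGet?_countA, pvOccs_eq]
  set L := ((pvPairs covidData).filter (fun x => x.1 == q)).map Prod.snd with hL
  by_cases h : (pvPairs covidData).any (fun x => x.1 == q) = true
  · simp only [h, if_true, Option.map_some]
    obtain ⟨x, hxmem, hxq⟩ := List.any_eq_true.mp h
    have hs0 : x.2 ∈ L := List.mem_map_of_mem (List.mem_filter.mpr ⟨hxmem, hxq⟩)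
    have hLne : PySem.Set.ofList L ≠ [] := by
      intro hnil
      have hm := (PySem.Set.mem_ofList L x.2).mpr hs0
      rw [hnil] at hm
      exact (List.not_mem_nil).elim hm
    obtain ⟨s0, u, hu⟩ := List.exists_cons_of_ne_nil hLne
    have hs0mem : s0 ∈ L := by
      have : s0 ∈ PySem.Set.ofList L := by rw [hu]; exact List.mem_cons_self
      exact (PySem.Set.mem_ofList _ _).mp this
    have hpos : (-1 : Int) < (L.count s0 : Int) := by
      have := List.count_pos_iff.mpr hs0mem
      omega
    have hB := pvMin?_eq L
    rw [hu] at hB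
    simp only [List.map_cons, List.foldl_cons] at hB
    have hB1 : pvMStep none ((-(L.count s0 : Int), s0)) = some ((-(L.count s0 : Int), s0)) := rfl
    rw [hB1, pvCmp_fold u (fun s => (L.count s : Int)) (L.count s0 : Int) s0] at hB
    rw [PySem.Dict.items_counter, hu]
    simp only [List.map_cons, List.foldl_cons]
    have hA1 : pvAStep (-1, "") (s0, (L.count s0 : Int)) = ((L.count s0 : Int), s0) := by
      unfold pvAStep
      simp [hpos]
    rw [hA1]
    cases hmin : pvMin? L with
    | none => rw [hmin] at hB; simp at hB
    | some v =>
      rw [hmin] at hB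
      simp only [Option.map_some, Option.some.injEq, Prod.mk.injEq] at hB
      rw [hB.2]
  · have hf : (pvPairs covidData).any (fun x => x.1 == q) = false := eq_false_of_ne_true h
    simp only [hf, Bool.false_eq_true, if_false]
    have hfil : (pvPairs covidData).filter (fun x => x.1 == q) = [] := by
      rw [List.filter_eq_nil_iff]
      intro x hx
      have := List.any_eq_false.mp hf x hx
      simpa using this
    have hLnil : L = [] := by rw [hL, hfil]; rfl
    have hnone : pvMin? L = none := by rw [hLnil]; rfl
    rw [hnone]
    rfl

theorem fill_missing_symptoms_main (covidData : List (List (String × String)))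
    (hpre : Pre_fill_missing_symptoms covidData) :
    fill_missing_symptoms covidData = fill_missing_symptoms_alt covidData := by
  simp only [fill_missing_symptoms, fill_missing_symptoms_alt]
  apply List.map_congr_left
  intro c hc
  by_cases hs : PySem.Dict.get? (PySem.Dict.mk c) "symptoms" = some "NaN"
  · rw [if_pos hs, if_pos hs]
    obtain ⟨c', _, hne, heq, _⟩ := hpre.2 c hc hs
    cases hp : PySem.Dict.get? (PySem.Dict.mk c) "province" with
    | none => rw [hp] at heq; exact absurd heq hne
    | some p =>
      show (match (pvMostA covidData).get? (some p) with
            | some v => ((PySem.Dict.mk c).insert "symptoms" v).items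
            | none => c)
          = (match pvMin? (pvOccs covidData (some p)) with
            | some v => ((PySem.Dict.mk c).insert "symptoms" v).items
            | none => c)
      rw [pvKey covidData (some p)]
  · rw [if_neg hs, if_neg hs]

-- ===== VERDICT (by name: the statement is the Claim_ definition above) =====
theorem fill_missing_symptoms_spec : Claim_equal_fill_missing_symptoms := by
  intro covidData _ hpre
  unfold Spec_fill_missing_symptoms
  exact fill_missing_symptoms_main covidData hpre
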